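-- pv_equiv track=rewrite | github.com/mrquokka23/assertjinator2000 | main.py | remove_junit
-- ===== SOURCE A (Python) =====
-- def remove_junit(lines):
--     have_imported = False
--     new_lines = list()
--     for line in lines:
--         if line.__contains__("import static org.junit.jupiter.api.Assertions"):
--             if not have_imported:
--                 new_lines.append("import static org.assertj.core.api.Assertions.assertThat;\n")
--                 have_imported = True
--         else:
--             new_lines.append(line)
--     return new_lines
-- ===== SOURCE B (Python) =====
-- JUNIT = "import static org.junit.jupiter.api.Assertions"
-- ASSERTJ = "import static org.assertj.core.api.Assertions.assertThat;\n"
--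
-- def remove_junit(lines):
--     kept = [l for l in lines if JUNIT not in l]
--     pos = None
--     for i, l in enumerate(lines):
--         if JUNIT in l:
--             pos = i
--             break
--     if pos is not None:
--         kept.insert(pos, ASSERTJ)
--     return kept
-- ===== Notes on version B (the rewrite author's own statement) =====
-- stated objective: alternative
-- what changed: Replaces the single flag-driven accumulation loop with two shaped passes: a filter that drops every junit-import line, plus a locate pass that finds the first junit line's index and inserts the assertj import there.
import Mathlib
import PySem

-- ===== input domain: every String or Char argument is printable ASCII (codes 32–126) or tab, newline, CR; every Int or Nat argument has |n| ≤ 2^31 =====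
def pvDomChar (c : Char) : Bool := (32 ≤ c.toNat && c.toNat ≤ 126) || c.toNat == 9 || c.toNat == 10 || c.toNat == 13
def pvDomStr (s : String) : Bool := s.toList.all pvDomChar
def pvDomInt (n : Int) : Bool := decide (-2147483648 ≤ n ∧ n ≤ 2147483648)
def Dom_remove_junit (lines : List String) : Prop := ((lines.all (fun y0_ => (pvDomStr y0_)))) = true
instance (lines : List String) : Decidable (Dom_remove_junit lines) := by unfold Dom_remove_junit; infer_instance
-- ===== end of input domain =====

-- B replaces A's single flag-driven loop by a filter pass plus a locate-and-insert pass; alternative decomposition, same cost, return value proved equal.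

def pvJunit : String := "import static org.junit.jupiter.api.Assertions"
def pvAssertj : String := "import static org.assertj.core.api.Assertions.assertThat;\n"

-- ===== PORT A =====
-- A's loop: state (have_imported, new_lines), appending as Python does
-- the loop body: one iteration on the state (have_imported, new_lines)
def pvStep (st : Bool × List String) (line : String) : Bool × List String :=
  if PySem.Str.isIn pvJunit line then
    if !st.1 then (true, st.2 ++ [pvAssertj]) else st
  else (st.1, st.2 ++ [line])

def remove_junit (lines : List String) : List String :=
  (lines.foldl pvStep (false, [])).2

-- ===== PORT B =====
-- B's locate pass: index of the first line containing the junit marker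
def pvFindJunit : List String → Option Nat
  | [] => none
  | l :: ls => if PySem.Str.isIn pvJunit l then some 0 else (pvFindJunit ls).map (· + 1)

def remove_junit_alt (lines : List String) : List String :=
  let kept := lines.filter (fun l => !(PySem.Str.isIn pvJunit l))
  match pvFindJunit lines with
  | some p => PySem.List.insert kept (p : Int) pvAssertj
  | none => kept

-- ===== PRECONDITION & SPEC =====
def Spec_remove_junit (lines : List String) (out : List String) : Prop := out = remove_junit_alt lines
instance (lines : List String) (out : List String) : Decidable (Spec_remove_junit lines out) := by unfold Spec_remove_junit; infer_instance

-- ===== CLAIM (what is proved, stated in full; the proofs are below) =====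
def Claim_equal_remove_junit : Prop := ∀ (lines : List String), Dom_remove_junit lines → Spec_remove_junit lines (remove_junit lines)

-- ===== LEMMAS AND PROOFS =====

-- what A's loop appends after the accumulator, given the current flag
def pvBody : List String → Bool → List String
  | [], _ => []
  | l :: ls, flag =>
    if PySem.Str.isIn pvJunit l then
      if flag then pvBody ls true else pvAssertj :: pvBody ls true
    else l :: pvBody ls flag

theorem pvLoopA (ls : List String) : ∀ (flag : Bool) (acc : List String),
    (ls.foldl pvStep (flag, acc)).2 = acc ++ pvBody ls flag := by
  induction ls with
  | nil => intro flag acc; simp [pvBody]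
  | cons l ls ih =>
    intro flag acc
    rw [List.foldl_cons]
    by_cases h : PySem.Chars.isIn pvJunit.toList l.toList = true
    · cases flag
      · rw [show pvStep (false, acc) l = (true, acc ++ [pvAssertj]) by simp [pvStep, h], ih]
        simp [pvBody, h]
      · rw [show pvStep (true, acc) l = (true, acc) by simp [pvStep, h], ih]
        simp [pvBody, h]
    · simp at h
      rw [show pvStep (flag, acc) l = (flag, acc ++ [l]) by simp [pvStep, h], ih]
      simp [pvBody, h]

theorem pvBody_true (ls : List String) :
    pvBody ls true = ls.filter (fun l => !(PySem.Chars.isIn pvJunit.toList l.toList)) := by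
  induction ls with
  | nil => rfl
  | cons l ls ih =>
    by_cases h : PySem.Chars.isIn pvJunit.toList l.toList = true
    · simp [pvBody, h, List.filter_cons, ih]
    · simp at h; simp [pvBody, h, List.filter_cons, ih]

theorem pvFind_le (ls : List String) : ∀ p, pvFindJunit ls = some p →
    p ≤ (ls.filter (fun l => !(PySem.Chars.isIn pvJunit.toList l.toList))).length := by
  induction ls with
  | nil => intro p h; simp [pvFindJunit] at h
  | cons l ls ih =>
    intro p h
    by_cases hl : PySem.Chars.isIn pvJunit.toList l.toList = true
    · simp [pvFindJunit, hl] at h; omega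
    · simp at hl
      simp [pvFindJunit, hl] at h
      obtain ⟨q, hq, rfl⟩ := h
      have := ih q hq
      simp [List.filter_cons, hl]
      omega

theorem pvInsert_cons (l : String) (ks : List String) (p : Nat) (v : String)
    (h : p ≤ ks.length) :
    PySem.List.insert (l :: ks) ((p : Int) + 1) v = l :: PySem.List.insert ks (p : Int) v := by
  have h1 : ((p + 1 : Nat) : Int) = (p : Int) + 1 := by push_cast; ring
  rw [← h1, PySem.List.insert_natCast _ _ _ (by simp; omega),
      PySem.List.insert_natCast _ _ _ h]
  simp

theorem pvBody_false (ls : List String) : pvBody ls false = remove_junit_alt ls := by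
  induction ls with
  | nil => rfl
  | cons l ls ih =>
    by_cases h : PySem.Chars.isIn pvJunit.toList l.toList = true
    · simp [pvBody, remove_junit_alt, pvFindJunit, h, pvBody_true, List.filter_cons,
        PySem.List.insert_zero]
    · simp at h
      cases hf : pvFindJunit ls with
      | none => simp [pvBody, remove_junit_alt, pvFindJunit, h, hf, ih, List.filter_cons]
      | some p =>
        simp [pvBody, remove_junit_alt, pvFindJunit, h, hf, ih, List.filter_cons]
        rw [pvInsert_cons l _ p _ (pvFind_le ls p hf)]

-- ===== VERDICT (by name: the statement is the Claim_ definition above) =====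
theorem remove_junit_spec : Claim_equal_remove_junit := by
  intro lines _
  unfold Spec_remove_junit remove_junit
  rw [pvLoopA, pvBody_false]
  simp
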